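-- pv_equiv track=rewrite | github.com/anonymos-saner-2026/maveric_off | src/baselines/linear_tool.py | format_snippets_for_prompt
-- ===== SOURCE A (Python) =====
-- from typing import List, Dict, Any, Optional, Tuple
--
-- def format_snippets_for_prompt(snippets: List[Dict[str, str]], max_chars: int = 5000) -> str:
--     """Format snippets for inclusion in prompts."""
--     if not snippets:
--         return "[No evidence retrieved]"
--
--     lines = []
--     total_chars = 0
--
--     for i, s in enumerate(snippets, 1):
--         title = s.get("title", "Untitled")[:100]
--         url = s.get("url", "")[:100]
--         snippet = s.get("snippet", "")[:400]
--
--         line = f"[{i}] {title}\n    URL: {url}\n    {snippet}\n"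
--
--         if total_chars + len(line) > max_chars:
--             lines.append(f"... ({len(snippets) - i + 1} more snippets truncated)")
--             break
--
--         lines.append(line)
--         total_chars += len(line)
--
--     return "\n".join(lines)
-- ===== SOURCE B (Python) =====
-- def format_snippets_for_prompt(snippets, max_chars=5000):
--     """Format snippets for inclusion in prompts (prefix-sum cutoff formulation)."""
--     if not snippets:
--         return "[No evidence retrieved]"
--
--     lines = [
--         f"[{i}] {s.get('title', 'Untitled')[:100]}\n"
--         f"    URL: {s.get('url', '')[:100]}\n"
--         f"    {s.get('snippet', '')[:400]}\n"
--         for i, s in enumerate(snippets, 1)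
--     ]
--
--     sums = []
--     t = 0
--     for line in lines:
--         t += len(line)
--         sums.append(t)
--
--     cut = next((k for k, t in enumerate(sums) if t > max_chars), len(lines))
--
--     kept = lines[:cut]
--     if cut < len(lines):
--         kept.append(f"... ({len(snippets) - cut} more snippets truncated)")
--     return "\n".join(kept)
-- ===== Notes on version B (the rewrite author's own statement) =====
-- stated objective: alternative
-- what changed: Replaces A's single accumulate-and-break loop (running char total, early append of the truncation notice) by a three-stage pipeline: map every snippet to its formatted line, compute explicit prefix sums of line lengths, then locate the first over-budget index as a cutoff and assemble lines[:cut] plus the truncation notice.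
import Mathlib
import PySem

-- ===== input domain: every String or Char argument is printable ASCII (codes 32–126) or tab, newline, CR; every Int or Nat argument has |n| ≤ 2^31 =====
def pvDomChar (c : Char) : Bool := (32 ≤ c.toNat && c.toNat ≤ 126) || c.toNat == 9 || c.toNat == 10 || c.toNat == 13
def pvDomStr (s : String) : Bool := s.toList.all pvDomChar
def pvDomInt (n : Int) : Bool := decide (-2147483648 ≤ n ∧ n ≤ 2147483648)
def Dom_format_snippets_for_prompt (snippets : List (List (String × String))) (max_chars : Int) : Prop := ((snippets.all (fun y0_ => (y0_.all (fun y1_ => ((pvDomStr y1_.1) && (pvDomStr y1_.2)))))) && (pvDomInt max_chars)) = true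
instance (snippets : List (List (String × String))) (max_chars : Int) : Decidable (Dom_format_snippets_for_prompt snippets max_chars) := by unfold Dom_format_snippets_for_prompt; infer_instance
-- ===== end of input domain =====

-- B replaces A's accumulate-and-break loop by a map to formatted lines, explicit prefix
-- sums and a first-over-budget cutoff search (objective: alternative decomposition).

-- shared formatting helpers (the f-strings and "\n".join common to both Pythons)
def pvLine (i : Int) (s : List (String × String)) : List Char :=
  ['['] ++ PySem.Int.toChars i ++ "] ".toList
    ++ PySem.List.slice (PySem.Dict.getD ⟨s⟩ "title" "Untitled").toList none (some 100)
    ++ "\n    URL: ".toList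
    ++ PySem.List.slice (PySem.Dict.getD ⟨s⟩ "url" "").toList none (some 100)
    ++ "\n    ".toList
    ++ PySem.List.slice (PySem.Dict.getD ⟨s⟩ "snippet" "").toList none (some 400)
    ++ ['\n']

def pvMsg (c : Int) : List Char :=
  "... (".toList ++ PySem.Int.toChars c ++ " more snippets truncated)".toList

def pvJoinNL (ls : List (List Char)) : List Char := (List.intersperse ['\n'] ls).flatten

-- ===== PORT A =====
def pvALoop (n mc : Int) : List (List (String × String)) → Int → Int → List (List Char) → List (List Char)
  | [], _, _, lines => lines
  | s :: rest, i, total, lines =>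
    let line := pvLine i s
    if total + (line.length : Int) > mc then lines ++ [pvMsg (n - i + 1)]
    else pvALoop n mc rest (i + 1) (total + (line.length : Int)) (lines ++ [line])

def format_snippets_for_prompt (snippets : List (List (String × String))) (max_chars : Int) : String :=
  if snippets = [] then "[No evidence retrieved]"
  else String.ofList (pvJoinNL (pvALoop (snippets.length : Int) max_chars snippets 1 0 []))

-- ===== PORT B =====
def pvPrefixSums : List (List Char) → Int → List Int
  | [], _ => []
  | l :: rest, t => (t + (l.length : Int)) :: pvPrefixSums rest (t + (l.length : Int))

def format_snippets_for_prompt_alt (snippets : List (List (String × String))) (max_chars : Int) : String :=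
  if snippets = [] then "[No evidence retrieved]"
  else
    let lines := (PySem.List.enumerate snippets 1).map (fun p => pvLine p.1 p.2)
    let sums := pvPrefixSums lines 0
    let cut := (sums.findIdx? (fun t => decide (t > max_chars))).getD lines.length
    let kept := lines.take cut ++
      (if cut < lines.length then [pvMsg ((snippets.length : Int) - (cut : Int))] else [])
    String.ofList (pvJoinNL kept)

-- ===== PRECONDITION & SPEC =====
def Spec_format_snippets_for_prompt (snippets : List (List (String × String))) (max_chars : Int) (out : String) : Prop := out = format_snippets_for_prompt_alt snippets max_chars
instance (snippets : List (List (String × String))) (max_chars : Int) (out : String) : Decidable (Spec_format_snippets_for_prompt snippets max_chars out) := by unfold Spec_format_snippets_for_prompt; infer_instance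

-- ===== CLAIM (what is proved, stated in full; the proofs are below) =====
def Claim_equal_format_snippets_for_prompt : Prop := ∀ (snippets : List (List (String × String))) (max_chars : Int), Dom_format_snippets_for_prompt snippets max_chars → Spec_format_snippets_for_prompt snippets max_chars (format_snippets_for_prompt snippets max_chars)

-- ===== LEMMAS AND PROOFS =====

-- canonical recursive description of the kept lines
def pvCore (n mc : Int) : List (List (String × String)) → Int → Int → List (List Char)
  | [], _, _ => []
  | s :: rest, i, total =>
    let line := pvLine i s
    if total + (line.length : Int) > mc then [pvMsg (n - i + 1)]
    else line :: pvCore n mc rest (i + 1) (total + (line.length : Int))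

theorem pvALoop_eq_core (n mc : Int) (snips : List (List (String × String)))
    (i total : Int) (acc : List (List Char)) :
    pvALoop n mc snips i total acc = acc ++ pvCore n mc snips i total := by
  induction snips generalizing i total acc with
  | nil => simp [pvALoop, pvCore]
  | cons s rest ih =>
    simp only [pvALoop, pvCore]
    split_ifs with h
    · rfl
    · rw [ih]; simp

theorem pvGetD_map_add_one (o : Option Nat) (m : Nat) :
    (o.map (· + 1)).getD (m + 1) = o.getD m + 1 := by cases o <;> rfl

def pvBkept (n mc : Int) (snips : List (List (String × String))) (i total : Int) : List (List Char) :=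
  let lines := (PySem.List.enumerate snips i).map (fun p => pvLine p.1 p.2)
  let cut := ((pvPrefixSums lines total).findIdx? (fun t => decide (t > mc))).getD lines.length
  lines.take cut ++ (if cut < lines.length then [pvMsg (n - (i - 1) - (cut : Int))] else [])

theorem pvBcut_eq_core (n mc : Int) (snips : List (List (String × String))) (i total : Int) :
    pvBkept n mc snips i total = pvCore n mc snips i total := by
  induction snips generalizing i total with
  | nil => simp [pvBkept, PySem.List.enumerate, pvPrefixSums, pvCore]
  | cons s rest ih =>
    simp only [pvBkept, PySem.List.enumerate, List.map_cons, pvPrefixSums, List.findIdx?_cons,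
      pvCore]
    by_cases h : total + ((pvLine i s).length : Int) > mc
    · rw [if_pos (by simpa using h), if_pos h]
      simp only [Option.getD_some, List.take_zero, List.length_cons, List.nil_append,
        if_pos (Nat.succ_pos _), Nat.cast_zero, sub_zero]
      have hm : n - (i - 1) = n - i + 1 := by ring
      rw [hm]
    · rw [if_neg (by simpa using h), if_neg h]
      simp only [List.length_cons]
      rw [pvGetD_map_add_one, List.take_succ_cons, List.cons_append]
      push_cast
      have harg : ∀ c : Int, n - (i - 1) - (c + 1) = n - (i + 1 - 1) - c := fun c => by ring
      rw [harg]
      simp only [Nat.add_lt_add_iff_right]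
      rw [← ih (i + 1) (total + ((pvLine i s).length : Int))]
      simp only [pvBkept]

theorem format_snippets_for_prompt_spec : Claim_equal_format_snippets_for_prompt := by
  unfold Claim_equal_format_snippets_for_prompt
  intro snippets max_chars _
  unfold Spec_format_snippets_for_prompt
  unfold format_snippets_for_prompt format_snippets_for_prompt_alt
  split_ifs with h
  · rfl
  · simp only
    congr 1
    rw [pvALoop_eq_core, List.nil_append,
      ← pvBcut_eq_core (snippets.length : Int) max_chars snippets 1 0]
    simp [pvBkept, PySem.List.length_enumerate]
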